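-- pv_equiv track=rewrite | github.com/HRHRHRSSS/Coding_Test | 프로그래머스/2/138476. 귤 고르기/귤 고르기.py | solution
-- ===== SOURCE A (Python) =====
-- def solution(k, tangerine):
--     answer = 0
--     a = {}
--     # 주어진 리스트 tangerine에서 각 귤의 개수를 세어줌
--     for i in tangerine:
--         if i in a:
--             a[i]+=1
--         else:
--             a[i]=1
--     # 딕셔너리 값을 기준으로 내림차순 정렬
--     a = dict(sorted(a.items(), key=lambda x:x[1], reverse = True))
--     # 정렬된 value 값을 상자에 담을 수 있는 귤 개수(k)에서 빼주며 반복
--     # 정렬된 순서대로 귤을 선택하면서 k를 초과한 순간 선택 멈춤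
--     # 이 때 선택된 귤의 종류 수 반환!
--     for i in a:
--         if k<=0:
--             return answer
--         k-=a[i]
--         answer+=1
--     return answer
-- ===== SOURCE B (Python) =====
-- def solution(k, tangerine):
--     # Counting-sort style: bucket types by frequency, walk frequencies from max down.
--     counts = {}
--     for t in tangerine:
--         counts[t] = counts.get(t, 0) + 1
--     if not counts:
--         return 0
--     maxf = max(counts.values())
--     buckets = {}
--     for c in counts.values():
--         buckets[c] = buckets.get(c, 0) + 1
--     answer = 0
--     f = maxf
--     while f > 0:
--         for _ in range(buckets.get(f, 0)):
--             if k <= 0: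
--                 return answer
--             k -= f
--             answer += 1
--         f -= 1
--     return answer
-- ===== Notes on version B (the rewrite author's own statement) =====
-- stated objective: faster
-- what changed: B replaces A's comparison sort of the counter items by a frequency-of-frequencies table (a second counter) walked from the maximum frequency downwards, a counting-sort-style descending pass.
import Mathlib
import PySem

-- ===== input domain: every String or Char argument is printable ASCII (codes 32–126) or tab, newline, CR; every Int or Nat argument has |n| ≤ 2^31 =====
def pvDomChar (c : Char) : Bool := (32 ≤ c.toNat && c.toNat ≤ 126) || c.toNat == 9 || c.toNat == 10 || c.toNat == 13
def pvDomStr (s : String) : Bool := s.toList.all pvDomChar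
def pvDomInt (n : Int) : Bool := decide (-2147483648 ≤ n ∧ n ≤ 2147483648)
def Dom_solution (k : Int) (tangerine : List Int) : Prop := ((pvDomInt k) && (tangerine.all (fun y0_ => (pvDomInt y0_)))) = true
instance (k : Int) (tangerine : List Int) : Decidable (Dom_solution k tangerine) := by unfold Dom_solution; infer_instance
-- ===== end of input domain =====

-- B replaces A's comparison sort of the counter by a frequency-of-frequencies table
-- walked from the maximum frequency downwards (objective: alternative decomposition).

-- ===== PORT A =====
-- 'for i in a: if k<=0: return answer; k -= a[i]; answer += 1'
-- (a[i] is exact as getD 0 here: i ranges over a's own keys, so the lookup never misses)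
def pvLoopA (a : PySem.Dict Int Int) : List Int → Int → Int → Int
  | [], _, answer => answer
  | i :: rest, k, answer =>
    if k ≤ 0 then answer
    else pvLoopA a rest (k - a.getD i 0) (answer + 1)

def solution (k : Int) (tangerine : List Int) : Int :=
  let a := tangerine.foldl
    (fun a i => if a.contains i then a.modify i 0 (· + 1) else a.insert i 1)
    PySem.Dict.empty
  let a2 := PySem.Dict.ofList (PySem.List.sorted a.items (fun x => x.2) true)
  pvLoopA a2 a2.keys k 0

-- ===== PORT B =====
-- inner 'for _ in range(n)': Sum.inl = fall through with the new (k, answer), Sum.inr = early return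
def pvInnerB (f : Int) : Nat → Int → Int → (Int × Int) ⊕ Int
  | 0, k, answer => Sum.inl (k, answer)
  | n + 1, k, answer =>
    if k ≤ 0 then Sum.inr answer else pvInnerB f n (k - f) (answer + 1)

-- 'while f > 0: …; f -= 1' counting down from maxf; fn is the current f as a Nat (f = fn)
def pvOuterB (buckets : PySem.Dict Int Int) : Nat → Int → Int → Int
  | 0, _, answer => answer
  | fn + 1, k, answer =>
    match pvInnerB ((fn : Int) + 1) (buckets.getD ((fn : Int) + 1) 0).toNat k answer with
    | Sum.inl (k', ans') => pvOuterB buckets fn k' ans'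
    | Sum.inr ans => ans

def solution_alt (k : Int) (tangerine : List Int) : Int :=
  let counts := tangerine.foldl (fun d t => d.insert t (d.getD t 0 + 1)) PySem.Dict.empty
  if counts.items = [] then 0
  else
    match PySem.List.max? counts.values (fun x => x) with
    | none => 0   -- unreachable: counts is nonempty here
    | some maxf =>
      let buckets := counts.values.foldl (fun d c => d.insert c (d.getD c 0 + 1)) PySem.Dict.empty
      pvOuterB buckets maxf.toNat k 0

-- ===== PRECONDITION & SPEC =====
def Spec_solution (k : Int) (tangerine : List Int) (out : Int) : Prop := out = solution_alt k tangerine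
instance (k : Int) (tangerine : List Int) (out : Int) : Decidable (Spec_solution k tangerine out) := by unfold Spec_solution; infer_instance

-- ===== CLAIM (what is proved, stated in full; the proofs are below) =====
def Claim_equal_solution : Prop := ∀ (k : Int) (tangerine : List Int), Dom_solution k tangerine → Spec_solution k tangerine (solution k tangerine)

-- ===== LEMMAS AND PROOFS =====

-- the common core loop: walk a list of frequencies, check k before subtracting
def pvRun : List Int → Int → Int → Int
  | [], _, ans => ans
  | c :: cs, k, ans => if k ≤ 0 then ans else pvRun cs (k - c) (ans + 1)

-- B's conceptual frequency list: for f = n, n-1, …, 1, (cs.count f) copies of f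
def pvDesc (cs : List Int) : Nat → List Int
  | 0 => []
  | m + 1 => List.replicate (cs.count ((m : Int) + 1)) ((m : Int) + 1) ++ pvDesc cs m

theorem pvCountA_eq_counter (tangerine : List Int) :
    tangerine.foldl
      (fun a i => if a.contains i then a.modify i 0 (· + 1) else a.insert i 1)
      PySem.Dict.empty = PySem.Dict.counter tangerine := by
  rw [PySem.Dict.counter_eq_foldl]
  congr 1
  funext d i
  by_cases h : d.contains i = true
  · simp [h]
  · simp only [Bool.not_eq_true] at h
    simp [h, PySem.Dict.modify, PySem.Dict.insert, PySem.Dict.getD_of_not_contains d 0 h]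

theorem pvLoopA_eq_run (a : PySem.Dict Int Int) (ps : List (Int × Int))
    (h : ∀ p ∈ ps, a.getD p.1 0 = p.2) (k ans : Int) :
    pvLoopA a (ps.map Prod.fst) k ans = pvRun (ps.map Prod.snd) k ans := by
  induction ps generalizing k ans with
  | nil => rfl
  | cons p rest ih =>
    simp only [List.map_cons, pvLoopA, pvRun, h p (by simp)]
    split_ifs with hk
    · rfl
    · exact ih (fun q hq => h q (by simp [hq])) _ _

theorem pvInnerB_run (f : Int) (rest : List Int) (n : Nat) (k ans : Int) :
    (match pvInnerB f n k ans with
     | Sum.inl (k', ans') => pvRun rest k' ans'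
     | Sum.inr a => a) = pvRun (List.replicate n f ++ rest) k ans := by
  induction n generalizing k ans with
  | zero => rfl
  | succ m ih =>
    simp only [pvInnerB, List.replicate_succ, List.cons_append, pvRun]
    split_ifs with hk
    · rfl
    · exact ih _ _

theorem pvOuterB_run (cs : List Int) (n : Nat) (k ans : Int) :
    pvOuterB (PySem.Dict.counter cs) n k ans = pvRun (pvDesc cs n) k ans := by
  induction n generalizing k ans with
  | zero => rfl
  | succ m ih =>
    simp only [pvOuterB, pvDesc]
    rw [← pvInnerB_run ((m : Int) + 1) (pvDesc cs m)]
    have hb : ((PySem.Dict.counter cs).getD ((m : Int) + 1) 0).toNat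
        = cs.count ((m : Int) + 1) := by
      rw [PySem.Dict.getD_counter]; simp
    rw [hb]
    cases hI : pvInnerB ((m : Int) + 1) (cs.count ((m : Int) + 1)) k ans with
    | inl p => exact ih p.1 p.2
    | inr a => rfl

theorem mem_pvDesc (cs : List Int) (n : Nat) (x : Int) (hx : x ∈ pvDesc cs n) :
    1 ≤ x ∧ x ≤ (n : Int) := by
  induction n with
  | zero => simp [pvDesc] at hx
  | succ m ih =>
    simp only [pvDesc, List.mem_append, List.mem_replicate] at hx
    rcases hx with ⟨-, rfl⟩ | hx
    · omega
    · have := ih hx; omega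

theorem pvDesc_pairwise (cs : List Int) (n : Nat) :
    (pvDesc cs n).Pairwise (fun a b => b ≤ a) := by
  induction n with
  | zero => simp [pvDesc]
  | succ m ih =>
    simp only [pvDesc, List.pairwise_append]
    refine ⟨List.pairwise_replicate.2 (Or.inr le_rfl), ih, ?_⟩
    intro a ha b hb
    rw [List.mem_replicate] at ha
    have := mem_pvDesc cs m b hb
    omega

theorem count_pvDesc (cs : List Int) (n : Nat) (v : Int) :
    (pvDesc cs n).count v = if 1 ≤ v ∧ v ≤ (n : Int) then cs.count v else 0 := by
  induction n with
  | zero => simp [pvDesc]; omega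
  | succ m ih =>
    simp only [pvDesc, List.count_append, ih, List.count_replicate, beq_iff_eq]
    by_cases hv : v = (m : Int) + 1
    · subst hv
      push_cast
      rw [if_neg (by omega : ¬ (1 ≤ (m : Int) + 1 ∧ (m : Int) + 1 ≤ (m : Int))),
        if_pos (by omega : 1 ≤ (m : Int) + 1 ∧ (m : Int) + 1 ≤ (m : Int) + 1)]
      simp
    · rw [if_neg (fun h => hv h.symm)]
      split_ifs <;> omega

theorem pvDesc_perm (cs : List Int) (n : Nat)
    (h : ∀ x ∈ cs, 1 ≤ x ∧ x ≤ (n : Int)) : (pvDesc cs n).Perm cs := by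
  rw [List.perm_iff_count]
  intro v
  rw [count_pvDesc]
  split_ifs with hv
  · rfl
  · rcases List.count_eq_zero.2 (fun hmem => hv (h v hmem)) with h0
    omega

-- ===== VERDICT (by name: the statement is the Claim_ definition above) =====
theorem solution_spec : Claim_equal_solution := by
  intro k tangerine _
  unfold Spec_solution solution solution_alt
  simp only [pvCountA_eq_counter, PySem.Dict.foldl_insert_getD_add_one_eq_counter]
  by_cases hemp : tangerine = []
  · subst hemp; rfl
  · -- the counter is nonempty
    have hitems : (PySem.Dict.counter tangerine).items
        = (PySem.Set.ofList tangerine).map (fun x => (x, (tangerine.count x : Int))) :=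
      PySem.Dict.items_counter tangerine
    have hne : (PySem.Dict.counter tangerine).items ≠ [] := by
      rw [hitems]
      rcases tangerine with - | ⟨t, ts⟩
      · exact absurd rfl hemp
      · intro h
        have ht : t ∈ PySem.Set.ofList (t :: ts) := (PySem.Set.mem_ofList _ _).2 (by simp)
        have h' := List.map_eq_nil_iff.1 h
        simp [h'] at ht
    rw [if_neg hne]
    -- the values list and its max
    set vals := (PySem.Dict.counter tangerine).values with hvals
    have hvne : vals ≠ [] := by
      intro h
      exact hne (by simpa [PySem.Dict.values] using List.map_eq_nil_iff.1 h)
    cases hmax : PySem.List.max? vals (fun x => x) with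
    | none => exact absurd ((PySem.List.max?_eq_none_iff vals (fun x => x)).1 hmax) hvne
    | some maxf =>
      have hmem : maxf ∈ vals := PySem.List.max?_mem hmax
      have hmaxle : ∀ y ∈ vals, y ≤ maxf := PySem.List.max?_isMax hmax
      -- every value is a positive count ≤ maxf
      have hrange : ∀ x ∈ vals, 1 ≤ x ∧ x ≤ (maxf.toNat : Int) := by
        intro x hx
        have hx1 : 1 ≤ x := by
          rw [hvals, PySem.Dict.values, hitems, List.map_map] at hx
          rcases List.mem_map.1 hx with ⟨y, hy, rfl⟩
          have : y ∈ tangerine := (PySem.Set.mem_ofList _ _).1 hy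
          have := List.count_pos_iff.2 this
          simp only [Function.comp]
          omega
        have := hmaxle x hx
        have h1 : 1 ≤ maxf := le_trans hx1 this
        omega
      -- B's side reduces to pvRun over pvDesc
      simp only [pvOuterB_run]
      -- A's side: the sorted items of the counter
      set sItems := PySem.List.sorted (PySem.Dict.counter tangerine).items (fun x => x.2) true with hsI
      have hnodupKeys : (sItems.map Prod.fst).Nodup := by
        have hperm : (sItems.map Prod.fst).Perm ((PySem.Dict.counter tangerine).items.map Prod.fst) :=
          (PySem.List.sorted_perm _ _ _).map _
      -- keys of the counter are nodup
        exact hperm.nodup_iff.2 (PySem.Dict.nodup_keys_counter tangerine)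
      have hofl : (PySem.Dict.ofList sItems).items = sItems := by
        have := PySem.Dict.items_foldl_insert_fresh sItems Prod.fst Prod.snd PySem.Dict.empty
          (by intro a _; simp) hnodupKeys
        simpa [PySem.Dict.ofList] using this
      have hkeys : (PySem.Dict.ofList sItems).keys = sItems.map Prod.fst := by
        simp [PySem.Dict.keys, hofl]
      rw [hkeys, pvLoopA_eq_run _ _ (by
        intro p hp
        exact PySem.Dict.getD_of_mem_items (PySem.Dict.ofList sItems)
          (by rw [hofl]; simpa using hp)
          (by rw [hkeys]; exact hnodupKeys) 0)]
      -- finally: the two frequency lists are equal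
      have hlist : sItems.map Prod.snd = pvDesc vals maxf.toNat := by
        refine List.Perm.eq_of_pairwise (le := fun a b => b ≤ a)
          (fun a b _ _ h1 h2 => le_antisymm h2 h1) ?_ (pvDesc_pairwise _ _) ?_
        · have := PySem.List.sorted_pairwise_rev (PySem.Dict.counter tangerine).items (fun x => x.2)
          rw [← hsI] at this
          exact this.map Prod.snd (fun a b h => h)
        · exact ((sItems.map Prod.snd).perm_iff_count.mpr (fun v => by
            have hp1 : (sItems.map Prod.snd).Perm vals := by
              rw [hvals, PySem.Dict.values]
              exact (PySem.List.sorted_perm _ _ _).map _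
            rw [List.Perm.count_eq hp1])).trans (pvDesc_perm vals maxf.toNat hrange).symm
      rw [hlist]
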